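-- pv_equiv track=rewrite | github.com/comery/HIFI-barcode-SE400 | HIFI-SE.py | depth_table
-- ===== SOURCE A (Python) =====
-- def max_length(seqs):
--     lens_seqs = [len(n) for n in seqs]
--     longest = max(lens_seqs)
--     return longest
--
-- def depth_table(seqs):
--     # ---------------depth_table----------#
--     longest = max_length(seqs)
--     consensus = ""
--     for m in range(longest):
--         depth = {}
--         for align in seqs:
--             if (m + 1) > len(align):
--                 continue # when sequence is too short, it will be out of index.
--             if align[m] in depth.keys():
--                 depth[align[m]] += 1
--             else:
--                 depth[align[m]] = 1
--
--         if "-" in depth.keys():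
--             del depth["-"]
--
--         # sorted_base = sorted(depth.iteritems(), key=lambda x: x[1], reverse=True)#
--         # sorted_base = sorted(depth, key=depth.__getitem__,reverse=True)
--         sorted_base = sorted(depth, key=lambda k: (depth[k], k), reverse=True)
--
--         # for some case, different bases have same deepth #
--
--         consensus += sorted_base[0]
--
--         depth = {}
--     return consensus
-- ===== SOURCE B (Python) =====
-- def depth_table(seqs):
--     # One pass over the data: build a per-column character counter table
--     # (transposed traversal), then read off each column's consensus base.
--     longest = max(len(s) for s in seqs)
--     cols = {}
--     for seq in seqs:
--         for i, ch in enumerate(seq):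
--             counts = cols.setdefault(i, {})
--             counts[ch] = counts.get(ch, 0) + 1
--     consensus = []
--     for m in range(longest):
--         col = dict(cols.get(m, {}))
--         col.pop("-", None)
--         consensus.append(sorted(col, key=lambda k: (col[k], k), reverse=True)[0])
--     return "".join(consensus)
-- ===== Notes on version B (the rewrite author's own statement) =====
-- stated objective: alternative
-- what changed: Transposed the traversal: instead of rescanning every sequence once per column (nested column-then-sequence loops rebuilding a fresh counter each time), B makes a single pass over the sequences filling a table of per-column counters keyed by index, then reads each column's consensus base off the table.
import Mathlib
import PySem

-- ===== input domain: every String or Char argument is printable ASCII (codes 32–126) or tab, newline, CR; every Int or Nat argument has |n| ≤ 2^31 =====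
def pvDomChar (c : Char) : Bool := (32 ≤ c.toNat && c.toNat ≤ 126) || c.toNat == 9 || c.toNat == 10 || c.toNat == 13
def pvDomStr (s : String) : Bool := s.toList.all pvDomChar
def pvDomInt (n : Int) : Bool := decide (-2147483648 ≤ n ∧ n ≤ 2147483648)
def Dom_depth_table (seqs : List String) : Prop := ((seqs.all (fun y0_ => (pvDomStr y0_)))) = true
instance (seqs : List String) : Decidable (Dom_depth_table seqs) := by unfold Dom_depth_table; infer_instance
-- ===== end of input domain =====

-- B transposes A's loops: one pass over the sequences fills per-column counters,
-- instead of rescanning every sequence for every column (objective: alternative decomposition).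

-- ===== PORT A =====
def max_length (seqs : List String) : Int :=
  let lens_seqs := seqs.map (fun n => PySem.Str.len n)
  -- max([]) raises ValueError: excluded by Pre_ (seqs ≠ [])
  (PySem.List.max? lens_seqs (fun x => x)).getD 0

def depth_table (seqs : List String) : String :=
  let longest := max_length seqs
  let consensus :=
    (PySem.List.pyRange 0 longest 1).foldl (fun consensus m =>
      let depth : PySem.Dict Char Int :=
        seqs.foldl (fun depth align =>
          if m + 1 > PySem.Str.len align then depth
          else
            -- align[m]: in range because of the guard (0 ≤ m < len align)
            let c := PySem.List.pyGetD align.toList m ' '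
            if depth.contains c then depth.insert c (depth.getD c 0 + 1)
            else depth.insert c 1) PySem.Dict.empty
      let depth := if depth.contains '-' then depth.erase '-' else depth
      let sorted_base :=
        PySem.List.sorted2 depth.keys (fun k => depth.getD k 0) (fun k => k) true
      -- sorted_base[0] raises IndexError on an all-'-'/empty column: excluded by Pre_
      consensus ++ [PySem.List.pyGetD sorted_base 0 '!']) ([] : List Char)
  String.ofList consensus

-- ===== PORT B =====
-- inner 'for i, ch in enumerate(seq)' loop; setdefault + in-place counts[ch] = counts.get(ch,0)+1
-- is exactly Dict.modify at key i with default {}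
def bumpSeq (cols : PySem.Dict Int (PySem.Dict Char Int)) (seq : String) :
    PySem.Dict Int (PySem.Dict Char Int) :=
  (PySem.List.enumerate seq.toList 0).foldl
    (fun cols p => cols.modify p.1 PySem.Dict.empty
      (fun counts => counts.insert p.2 (counts.getD p.2 0 + 1))) cols

def depth_table_alt (seqs : List String) : String :=
  -- max(len(s) for s in seqs); raises on []: excluded by Pre_
  let longest := (PySem.List.max? (seqs.map (fun s => PySem.Str.len s)) (fun x => x)).getD 0
  let cols := seqs.foldl bumpSeq PySem.Dict.empty
  String.ofList ((PySem.List.pyRange 0 longest 1).foldl (fun acc m =>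
    let col := (cols.getD m PySem.Dict.empty).erase '-'
    acc ++ [PySem.List.pyGetD
      (PySem.List.sorted2 col.keys (fun k => col.getD k 0) (fun k => k) true) 0 '!']) [])

-- ===== PRECONDITION & SPEC =====
-- Pre_ excludes exactly the inputs where A raises: the empty list (ValueError from max)
-- and inputs with a column whose entries are all '-' or absent (IndexError from sorted_base[0]).
def Pre_depth_table (seqs : List String) : Prop :=
  seqs ≠ [] ∧
  ∀ m ∈ List.range ((seqs.map (fun s => s.toList.length)).foldr max 0),
    ∃ s ∈ seqs, s.toList.getD m '-' ≠ '-'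
instance (seqs : List String) : Decidable (Pre_depth_table seqs) := by
  unfold Pre_depth_table; infer_instance

def pvWitness_depth_table : List String := ["AC", "AG", "A"]

def Spec_depth_table (seqs : List String) (out : String) : Prop := out = depth_table_alt seqs
instance (seqs : List String) (out : String) : Decidable (Spec_depth_table seqs out) := by
  unfold Spec_depth_table; infer_instance

-- ===== CLAIM (what is proved, stated in full; the proofs are below) =====
def Claim_equal_depth_table : Prop := ∀ (seqs : List String), Dom_depth_table seqs → Pre_depth_table seqs → Spec_depth_table seqs (depth_table seqs)

-- ===== LEMMAS AND PROOFS =====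

-- A's two insert branches are one insert (when the key is absent, getD gives 0)
theorem branch_merge (d : PySem.Dict Char Int) (c : Char) :
    (if d.contains c then d.insert c (d.getD c 0 + 1) else d.insert c 1)
      = d.insert c (d.getD c 0 + 1) := by
  by_cases h : d.contains c = true
  · simp [h]
  · simp only [Bool.not_eq_true] at h
    simp [h, PySem.Dict.getD_of_not_contains d 0 h]

-- the per-sequence inner loop of B, observed at one column m
theorem bump_enum_getD (l : List Char) (n m : Int)
    (cols : PySem.Dict Int (PySem.Dict Char Int)) :
    ((PySem.List.enumerate l n).foldl
      (fun cols p => cols.modify p.1 PySem.Dict.empty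
        (fun counts => counts.insert p.2 (counts.getD p.2 0 + 1))) cols).getD m PySem.Dict.empty
    = if n ≤ m ∧ m < n + l.length then
        (cols.getD m PySem.Dict.empty).insert (l.getD (m - n).toNat ' ')
          ((cols.getD m PySem.Dict.empty).getD (l.getD (m - n).toNat ' ') 0 + 1)
      else cols.getD m PySem.Dict.empty := by
  induction l generalizing n cols with
  | nil =>
    simp only [PySem.List.enumerate_nil, List.foldl_nil, List.length_nil, Nat.cast_zero,
      add_zero]
    rw [if_neg (by omega)]
  | cons c t ih =>
    rw [PySem.List.enumerate_cons, List.foldl_cons, ih]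
    by_cases hm : m = n
    · subst hm
      rw [if_neg (by omega), PySem.Dict.getD_modify_self,
        if_pos (by refine ⟨le_refl m, ?_⟩; simp)]
      simp
    · rw [PySem.Dict.getD_modify_of_ne _ _ _ (by exact fun h => hm h)]
      by_cases hr : n ≤ m ∧ m < n + (c :: t).length
      · have hr' : n + 1 ≤ m ∧ m < (n + 1) + (t.length : Int) := by
          simp at hr; omega
        have hidx : (m - (n + 1)).toNat + 1 = (m - n).toNat := by omega
        rw [if_pos hr', if_pos hr]
        have : (c :: t).getD (m - n).toNat ' ' = t.getD (m - (n + 1)).toNat ' ' := by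
          rw [← hidx]; rfl
        rw [this]
      · have hr' : ¬ (n + 1 ≤ m ∧ m < (n + 1) + (t.length : Int)) := by
          simp at hr ⊢; intro h; omega
        rw [if_neg hr', if_neg (by simp at hr ⊢; intro h; omega)]

-- the whole outer pass of B, observed at one column m, is A's single-column loop
theorem cols_fold_getD (seqs : List String) (m : Int) (hm : 0 ≤ m)
    (cols : PySem.Dict Int (PySem.Dict Char Int)) :
    (seqs.foldl bumpSeq cols).getD m PySem.Dict.empty
    = seqs.foldl (fun depth align =>
        if m + 1 > PySem.Str.len align then depth
        else
          let c := PySem.List.pyGetD align.toList m ' '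
          if depth.contains c then depth.insert c (depth.getD c 0 + 1)
          else depth.insert c 1) (cols.getD m PySem.Dict.empty) := by
  induction seqs generalizing cols with
  | nil => rfl
  | cons s t ih =>
    rw [List.foldl_cons, List.foldl_cons, ih]
    congr 1
    rw [bumpSeq, bump_enum_getD]
    rw [branch_merge]
    by_cases h : m + 1 > PySem.Str.len s
    · rw [if_pos h, if_neg (by simp [PySem.Str.len_eq] at h ⊢; omega)]
    · rw [if_neg h, if_pos (by simp [PySem.Str.len_eq] at h ⊢; omega)]
      rw [PySem.List.pyGetD_of_nonneg _ _ hm]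
      simp [List.getD]

-- erasing an absent key is the identity (A's guarded del vs B's unconditional pop)
theorem erase_not_contains {κ ν : Type} [BEq κ] (d : PySem.Dict κ ν)
    (k : κ) (h : d.contains k = false) : d.erase k = d := by
  apply PySem.Dict.ext
  show d.items.filter (fun p => !p.1 == k) = d.items
  rw [List.filter_eq_self]
  intro p hp
  simp only [PySem.Dict.contains, List.any_eq_false] at h
  simpa using h p hp

theorem depth_table_spec : Claim_equal_depth_table := by
  intro seqs _ _
  unfold Spec_depth_table depth_table depth_table_alt max_length
  dsimp only
  congr 1
  rw [PySem.List.foldl_append_singleton_eq_map, PySem.List.foldl_append_singleton_eq_map]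
  apply List.map_congr_left
  intro m hmem
  have hm : 0 ≤ m := by
    have := PySem.List.mem_pyRange_one.mp hmem; omega
  rw [cols_fold_getD seqs m hm PySem.Dict.empty, PySem.Dict.getD_empty]
  set depth := seqs.foldl _ (PySem.Dict.empty : PySem.Dict Char Int) with hd
  by_cases hc : depth.contains '-' = true
  · simp only [hc, if_true]
  · simp only [Bool.not_eq_true] at hc
    rw [if_neg (by simp [hc]), erase_not_contains _ _ hc]
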